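-- pv_equiv track=rewrite | github.com/SZRabinowitz/slackscope | slack_cli/render.py | _normalize_code_fences
-- ===== SOURCE A (Python) =====
-- def _normalize_code_fences(text: str) -> str:
--     parts = text.split("```")
--     if len(parts) < 3 or len(parts) % 2 == 0:
--         return text
--
--     output: list[str] = [parts[0]]
--     for index, part in enumerate(parts[1:], start=1):
--         if index % 2 == 1:
--             code = part
--             if code and not code.startswith("\n"):
--                 code = f"\n{code}"
--             if code and not code.endswith("\n"):
--                 code = f"{code}\n"
--             output.append(f"```{code}```")
--             continue
--         output.append(part)
--     return "".join(output)
-- ===== SOURCE B (Python) =====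
-- def _fix(s: str) -> str:
--     start = s.find("```")
--     if start == -1:
--         return s
--     end = s.find("```", start + 3)
--     if end == -1:
--         return s
--     code = s[start + 3:end]
--     if code and not code.startswith("\n"):
--         code = "\n" + code
--     if code and not code.endswith("\n"):
--         code = code + "\n"
--     return s[:start] + "```" + code + "```" + _fix(s[end + 3:])
--
--
-- def _normalize_code_fences(text: str) -> str:
--     n = text.count("```")
--     if n < 2 or n % 2 != 0:
--         return text
--     return _fix(text)
-- ===== Notes on version B (the rewrite author's own statement) =====
-- stated objective: alternative
-- what changed: Replaces split-on-fence plus index-parity reassembly with a count-based guard and a direct recursive scan that finds each balanced pair of fences with str.find and rewrites the enclosed code in place.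
import Mathlib
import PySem

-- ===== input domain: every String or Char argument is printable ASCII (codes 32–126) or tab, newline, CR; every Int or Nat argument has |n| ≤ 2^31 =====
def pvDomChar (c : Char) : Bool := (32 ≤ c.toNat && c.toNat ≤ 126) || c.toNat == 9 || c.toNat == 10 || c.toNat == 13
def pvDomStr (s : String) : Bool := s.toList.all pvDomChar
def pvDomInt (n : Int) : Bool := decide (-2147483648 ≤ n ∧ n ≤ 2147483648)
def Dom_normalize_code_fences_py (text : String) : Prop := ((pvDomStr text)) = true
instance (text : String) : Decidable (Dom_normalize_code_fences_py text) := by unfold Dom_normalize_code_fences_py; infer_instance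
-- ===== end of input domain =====

-- B replaces split-on-fence + index-parity reassembly by a count guard and a recursive find-based
-- scan over balanced fence pairs; same return value on every input (both are total).

-- the "```" fence, shared by both ports
def fenceCF : List Char := ['`', '`', '`']

-- the two padding statements, textually identical in A and B:
--   if code and not code.startswith("\n"): code = "\n" + code
--   if code and not code.endswith("\n"):   code = code + "\n"
def padCodeCF (code : List Char) : List Char :=
  let code := if !code.isEmpty && !(PySem.Chars.startswith code ['\n']) then '\n' :: code else code
  let code := if !code.isEmpty && !(PySem.Chars.endswith code ['\n']) then code ++ ['\n'] else code
  code

-- ===== PORT A =====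
-- the for-loop over enumerate(parts[1:], start=1), accumulating `output`
def loopCF : List (Int × List Char) → List (List Char) → List (List Char)
  | [], output => output
  | (index, part) :: rest, output =>
    if PySem.Int.mod index 2 == 1 then
      loopCF rest (output ++ [fenceCF ++ padCodeCF part ++ fenceCF])
    else
      loopCF rest (output ++ [part])

def normalize_code_fences_py (text : String) : String :=
  let parts := PySem.Chars.splitOn text.toList fenceCF
  if parts.length < 3 ∨ parts.length % 2 == 0 then text
  else
    let output : List (List Char) := [PySem.List.pyGetD parts 0 []]
    String.ofList (PySem.Chars.join []
      (loopCF (PySem.List.enumerate (PySem.List.slice parts (some 1) none) 1) output))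

-- ===== PORT B =====
-- _fix, the recursive scan; the fuel argument (initially the string length, which the scan
-- can never exhaust since each rewritten block consumes at least six characters) only makes
-- the recursion structural, it never changes the computed value
def fixCFgo : Nat → List Char → List Char
  | 0, s => s
  | fuel + 1, s =>
    let start := PySem.Chars.find s fenceCF
    if start = -1 then s
    else
      let e := PySem.Chars.findFrom s fenceCF (start + 3)
      if e = -1 then s
      else
        let code := PySem.List.slice s (some (start + 3)) (some e)
        PySem.List.slice s none (some start) ++ fenceCF ++ padCodeCF code ++ fenceCF ++
          fixCFgo fuel (PySem.List.slice s (some (e + 3)) none)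

def fixCF (s : List Char) : List Char := fixCFgo s.length s

def normalize_code_fences_py_alt (text : String) : String :=
  let n := PySem.Chars.count text.toList fenceCF
  if n < 2 ∨ n % 2 ≠ 0 then text
  else String.ofList (fixCF text.toList)

-- ===== PRECONDITION & SPEC =====
def Spec_normalize_code_fences_py (text : String) (out : String) : Prop := out = normalize_code_fences_py_alt text
instance (text : String) (out : String) : Decidable (Spec_normalize_code_fences_py text out) := by unfold Spec_normalize_code_fences_py; infer_instance

-- ===== CLAIM (what is proved, stated in full; the proofs are below) =====
def Claim_equal_normalize_code_fences_py : Prop := ∀ (text : String), Dom_normalize_code_fences_py text → Spec_normalize_code_fences_py text (normalize_code_fences_py text)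

-- ===== LEMMAS AND PROOFS =====

-- facts about the position returned by find / findFrom, used by the equivalence proof below
theorem find_drop_shape (l : List Char) (hf : 0 ≤ PySem.Chars.find l fenceCF) :
    (PySem.Chars.find l fenceCF).toNat + 3 ≤ l.length := by
  obtain ⟨hpre, -⟩ := PySem.Chars.find_spec hf
  have hle := hpre.length_le
  rw [List.length_drop, show fenceCF.length = 3 from rfl] at hle
  omega

theorem findFrom_shape (l : List Char) (hf : 0 ≤ PySem.Chars.find l fenceCF) :
    PySem.Chars.findFrom l fenceCF (PySem.Chars.find l fenceCF + 3) =
      if PySem.Chars.find (l.drop ((PySem.Chars.find l fenceCF).toNat + 3)) fenceCF = -1 then -1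
      else (((PySem.Chars.find l fenceCF).toNat + 3 : Nat) : Int) +
        PySem.Chars.find (l.drop ((PySem.Chars.find l fenceCF).toNat + 3)) fenceCF := by
  have hk := find_drop_shape l hf
  have hcast : PySem.Chars.find l fenceCF + 3 = (((PySem.Chars.find l fenceCF).toNat + 3 : Nat) : Int) := by
    rw [Nat.cast_add, Int.toNat_of_nonneg hf]
    norm_num
  rw [hcast]
  exact PySem.Chars.findFrom_natCast l fenceCF _ hk

-- reference splitter: structural version of str.split("```") (and of str.count's scan)
def SpCF : List Char → List (List Char)
  | [] => [[]]
  | c :: rest =>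
    if fenceCF.isPrefixOf (c :: rest) then [] :: SpCF (List.drop 3 (c :: rest))
    else (SpCF rest).modifyHead (c :: ·)
termination_by l => l.length
decreasing_by all_goals (simp; try omega)

theorem SpCF_nil : SpCF [] = [[]] := by
  rw [SpCF.eq_def]

theorem SpCF_cons (c : Char) (rest : List Char) :
    SpCF (c :: rest) = if fenceCF.isPrefixOf (c :: rest) then [] :: SpCF (List.drop 3 (c :: rest))
      else (SpCF rest).modifyHead (c :: ·) := by
  rw [SpCF.eq_def]

theorem SpCF_ne_nil (l : List Char) : SpCF l ≠ [] := by
  fun_induction SpCF l with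
  | case1 => simp
  | case2 c rest hp ih => simp
  | case3 c rest hp ih => simpa using ih

theorem SpCF_length_pos (l : List Char) : 0 < (SpCF l).length :=
  List.length_pos_iff.mpr (SpCF_ne_nil l)

theorem go_spec (fuel : Nat) : ∀ (l cur : List Char) (acc : List (List Char)), l.length < fuel →
    PySem.Chars.splitOn.go fenceCF fuel l cur acc =
      acc.reverse ++ (SpCF l).modifyHead (cur.reverse ++ ·) := by
  induction fuel with
  | zero => intro l cur acc h; omega
  | succ n ih =>
    intro l cur acc h
    match l with
    | [] => simp [PySem.Chars.splitOn.go, SpCF_nil]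
    | c :: rest =>
      rw [PySem.Chars.splitOn.go]
      by_cases hp : fenceCF.isPrefixOf (c :: rest)
      · rw [if_pos hp, ih _ _ _ (by simp [fenceCF] at h ⊢; omega)]
        rw [SpCF_cons, if_pos hp]
        simp [fenceCF]
        exact congrFun List.modifyHead_id _
      · rw [if_neg (by simp [hp]), ih _ _ _ (by simp at h ⊢; omega)]
        rw [SpCF_cons, if_neg hp, List.modifyHead_modifyHead]
        have hfg : ((fun x => cur.reverse ++ x) ∘ fun x : List Char => c :: x) =
            (fun x => (c :: cur).reverse ++ x) := by
          funext x
          simp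
        rw [hfg]

theorem splitOn_eq_SpCF (l : List Char) : PySem.Chars.splitOn l fenceCF = SpCF l := by
  rw [PySem.Chars.splitOn, go_spec (l.length + 1) l [] [] (by omega)]
  simp
  exact congrFun List.modifyHead_id _

theorem count_go_spec (fuel : Nat) : ∀ (l : List Char) (acc : Nat), l.length ≤ fuel →
    PySem.Chars.count.go fenceCF fuel l acc = acc + ((SpCF l).length - 1) := by
  induction fuel with
  | zero =>
    intro l acc h
    match l with
    | [] => simp [PySem.Chars.count.go, SpCF_nil]
    | c :: rest => simp at h
  | succ n ih =>
    intro l acc h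
    match l with
    | [] => simp [PySem.Chars.count.go, SpCF_nil]
    | c :: rest =>
      rw [PySem.Chars.count.go]
      by_cases hp : fenceCF.isPrefixOf (c :: rest)
      · rw [if_pos hp, ih _ _ (by simp [fenceCF] at h ⊢; omega)]
        rw [SpCF_cons, if_pos hp]
        have h2 := SpCF_length_pos (List.drop 2 rest)
        have h3 := SpCF_length_pos (List.drop 3 (c :: rest))
        simp [fenceCF]
        omega
      · rw [if_neg (by simp [hp]), ih _ _ (by simp at h ⊢; omega)]
        rw [SpCF_cons, if_neg hp]
        simp

theorem count_eq_SpCF (l : List Char) : PySem.Chars.count l fenceCF + 1 = (SpCF l).length := by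
  rw [PySem.Chars.count, if_neg (by simp [fenceCF]), count_go_spec l.length l 0 le_rfl]
  have := SpCF_length_pos l
  omega

theorem fence_prefix_infix {i : Nat} {l : List Char} (h : fenceCF <+: List.drop i l) :
    fenceCF <:+: l :=
  h.isInfix.trans (List.drop_suffix i l).isInfix

theorem find_unique {l : List Char} {i : Nat} (hi : fenceCF <+: List.drop i l)
    (hmin : ∀ j < i, ¬ fenceCF <+: List.drop j l) :
    PySem.Chars.find l fenceCF = (i : Int) := by
  have hnn : 0 ≤ PySem.Chars.find l fenceCF :=
    (PySem.Chars.find_nonneg_iff l fenceCF).mpr (fence_prefix_infix hi)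
  obtain ⟨hpre, hmn⟩ := PySem.Chars.find_spec hnn
  rcases lt_trichotomy (PySem.Chars.find l fenceCF).toNat i with hlt | heq | hgt
  · exact absurd hpre (hmin _ hlt)
  · omega
  · exact absurd hi (hmn i hgt)

theorem SpCF_of_find_neg (l : List Char) (h : PySem.Chars.find l fenceCF = -1) : SpCF l = [l] := by
  induction l with
  | nil => simp [SpCF_nil]
  | cons c rest ih =>
    rw [PySem.Chars.find_eq_neg_one_iff] at h
    have hp : ¬ fenceCF.isPrefixOf (c :: rest) = true := by
      intro hp
      exact h (List.IsPrefix.isInfix (List.isPrefixOf_iff_prefix.mp hp))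
    rw [SpCF_cons, if_neg hp]
    have hrest : PySem.Chars.find rest fenceCF = -1 := by
      rw [PySem.Chars.find_eq_neg_one_iff]
      intro hinf
      exact h (hinf.trans (List.suffix_cons c rest).isInfix)
    rw [ih hrest]
    simp

theorem SpCF_of_find_nonneg (l : List Char) (h : 0 ≤ PySem.Chars.find l fenceCF) :
    SpCF l = l.take (PySem.Chars.find l fenceCF).toNat ::
      SpCF (l.drop ((PySem.Chars.find l fenceCF).toNat + 3)) := by
  induction l with
  | nil =>
    exfalso
    rw [PySem.Chars.find_nonneg_iff] at h
    have := h.length_le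
    simp [fenceCF] at this
  | cons c rest ih =>
    by_cases hp : fenceCF.isPrefixOf (c :: rest) = true
    · have h0 : PySem.Chars.find (c :: rest) fenceCF = ((0 : Nat) : Int) :=
        find_unique (by simpa using List.isPrefixOf_iff_prefix.mp hp) (by omega)
      rw [SpCF_cons, if_pos hp, h0]
      simp
    · have hpfx : ¬ fenceCF <+: (c :: rest) := fun hx => hp (List.isPrefixOf_iff_prefix.mpr hx)
      have hinf : fenceCF <:+: (c :: rest) := (PySem.Chars.find_nonneg_iff _ _).mp h
      obtain ⟨j, hj⟩ : ∃ j, fenceCF <+: List.drop j (c :: rest) :=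
        (PySem.Chars.exists_prefix_drop_iff_isIn fenceCF (c :: rest)).mpr
          ((PySem.Chars.isIn_iff_infix _ _).mpr hinf)
      have hj0 : j ≠ 0 := by
        rintro rfl
        exact hpfx (by simpa using hj)
      have hrest : 0 ≤ PySem.Chars.find rest fenceCF := by
        rw [PySem.Chars.find_nonneg_iff]
        refine fence_prefix_infix (i := j - 1) ?_
        have : List.drop j (c :: rest) = List.drop (j - 1) rest := by
          conv_lhs => rw [show j = (j - 1) + 1 by omega]
          simp
        rwa [this] at hj
      obtain ⟨hpre, hmn⟩ := PySem.Chars.find_spec hrest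
      have hfind : PySem.Chars.find (c :: rest) fenceCF =
          (((PySem.Chars.find rest fenceCF).toNat + 1 : Nat) : Int) := by
        apply find_unique
        · simpa using hpre
        · intro k hk
          match k with
          | 0 => simpa using hpfx
          | k + 1 =>
            simp only [List.drop_succ_cons]
            exact hmn k (by omega)
      rw [SpCF_cons, if_neg hp, ih hrest, hfind]
      simp only [Int.toNat_natCast, List.take_succ_cons, List.drop_succ_cons, List.modifyHead_cons]

-- the value A assembles, as a function of the split parts


def rebuildCF : List (List Char) → List Char
  | [] => []
  | [p] => p
  | p :: c :: rest => p ++ fenceCF ++ padCodeCF c ++ fenceCF ++ rebuildCF rest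

theorem find_drop_nonneg_of_odd (l : List Char) (hf : 0 ≤ PySem.Chars.find l fenceCF)
    (h : (SpCF l).length % 2 = 1) :
    0 ≤ PySem.Chars.find (l.drop ((PySem.Chars.find l fenceCF).toNat + 3)) fenceCF := by
  by_contra hneg
  have hm1 : PySem.Chars.find (l.drop ((PySem.Chars.find l fenceCF).toNat + 3)) fenceCF = -1 := by
    have := PySem.Chars.neg_one_le_find (l.drop ((PySem.Chars.find l fenceCF).toNat + 3)) fenceCF
    omega
  rw [SpCF_of_find_nonneg l hf, SpCF_of_find_neg _ hm1] at h
  simp at h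

theorem fixCFgo_spec : ∀ (fuel : Nat) (l : List Char), l.length ≤ fuel →
    (SpCF l).length % 2 = 1 → fixCFgo fuel l = rebuildCF (SpCF l)
  | 0, l, hl, h => by
    have : l = [] := List.eq_nil_of_length_eq_zero (by omega)
    subst this
    rw [SpCF_nil, fixCFgo, rebuildCF]
  | fuel + 1, l, hl, h => by
    rw [fixCFgo]
    by_cases hs : PySem.Chars.find l fenceCF = -1
    · rw [if_pos hs, SpCF_of_find_neg l hs, rebuildCF]
    · have hf : 0 ≤ PySem.Chars.find l fenceCF := by
        have := PySem.Chars.neg_one_le_find l fenceCF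
        omega
      have hg : 0 ≤ PySem.Chars.find (l.drop ((PySem.Chars.find l fenceCF).toNat + 3)) fenceCF :=
        find_drop_nonneg_of_odd l hf h
      have hgne : PySem.Chars.find (l.drop ((PySem.Chars.find l fenceCF).toNat + 3)) fenceCF ≠ -1 := by
        omega
      have hk := find_drop_shape l hf
      have hk2 := find_drop_shape (l.drop ((PySem.Chars.find l fenceCF).toNat + 3)) hg
      rw [List.length_drop] at hk2
      set f := (PySem.Chars.find l fenceCF).toNat with hfdef
      set g := (PySem.Chars.find (l.drop (f + 3)) fenceCF).toNat with hgdef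
      have hfl : PySem.Chars.find l fenceCF = (f : Int) := (Int.toNat_of_nonneg hf).symm
      have hgl : PySem.Chars.find (l.drop (f + 3)) fenceCF = (g : Int) := (Int.toNat_of_nonneg hg).symm
      rw [if_neg hs, findFrom_shape l hf, if_neg hgne]
      rw [if_neg (by rw [hgl]; omega)]
      rw [hfl]
      simp only [Int.toNat_natCast]
      rw [hgl]
      -- the three slices
      rw [show ((f + 3 : Nat) : Int) + (g : Int) + 3 = ((f + 3 + g + 3 : Nat) : Int) by push_cast; ring,
          PySem.List.slice_from_natCast]
      rw [show (f : Int) + 3 = ((f + 3 : Nat) : Int) by push_cast; ring]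
      rw [show ((f + 3 : Nat) : Int) + (g : Int) = ((f + 3 + g : Nat) : Int) by push_cast; ring,
          PySem.List.slice_natCast, PySem.List.slice_to_natCast]
      rw [show f + 3 + g - (f + 3) = g by omega]
      -- the split of the right-hand side
      rw [SpCF_of_find_nonneg l hf, SpCF_of_find_nonneg _ hg, hfl, hgl]
      simp only [Int.toNat_natCast]
      rw [rebuildCF]
      have hdd : (l.drop (f + 3)).drop (g + 3) = l.drop (f + 3 + g + 3) := by
        rw [List.drop_drop]
        congr 1
      rw [hdd]
      have hodd : (SpCF (l.drop (f + 3 + g + 3))).length % 2 = 1 := by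
        rw [SpCF_of_find_nonneg l hf, SpCF_of_find_nonneg _ hg] at h
        simp only [← hfdef, ← hgdef, hdd, List.length_cons] at h
        omega
      rw [fixCFgo_spec fuel (l.drop (f + 3 + g + 3)) (by simp only [List.length_drop]; omega) hodd]

theorem fixCF_eq_rebuild (l : List Char) (h : (SpCF l).length % 2 = 1) :
    fixCF l = rebuildCF (SpCF l) :=
  fixCFgo_spec l.length l le_rfl h

def tailBuildCF : Nat → List (List Char) → List Char
  | _, [] => []
  | k, p :: rest => (if k % 2 = 1 then fenceCF ++ padCodeCF p ++ fenceCF else p) ++ tailBuildCF (k + 1) rest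

theorem joinNil : ∀ (xs : List (List Char)), PySem.Chars.join [] xs = xs.flatten
  | [] => by rw [PySem.Chars.join_nil]; rfl
  | [a] => by rw [PySem.Chars.join_singleton]; simp
  | a :: b :: t => by rw [PySem.Chars.join_cons_cons, joinNil (b :: t)]; simp

theorem loopCF_join (t : List (List Char)) (k : Nat) (out : List (List Char)) :
    PySem.Chars.join [] (loopCF (PySem.List.enumerate t (k : Int)) out) =
      PySem.Chars.join [] out ++ tailBuildCF k t := by
  induction t generalizing k out with
  | nil => simp [PySem.List.enumerate, loopCF, tailBuildCF]
  | cons p t ih =>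
    rw [show PySem.List.enumerate (p :: t) (k : Int) = ((k : Int), p) ::
          PySem.List.enumerate t ((k : Int) + 1) from rfl]
    rw [loopCF]
    have hmod : PySem.Int.mod (k : Int) 2 = ((k % 2 : Nat) : Int) := by
      exact_mod_cast PySem.Int.mod_natCast k 2
    rw [show ((k : Int) + 1) = ((k + 1 : Nat) : Int) by push_cast; ring]
    rw [tailBuildCF]
    by_cases hk : k % 2 = 1
    · rw [if_pos (by rw [hmod, hk]; rfl), ih (k + 1), if_pos hk]
      simp [joinNil, List.append_assoc]
    · rw [if_neg (by rw [hmod]; simp; omega), ih (k + 1), if_neg hk]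
      simp [joinNil, List.append_assoc]

theorem tailBuild_parity : ∀ (t : List (List Char)) (k k' : Nat), k % 2 = k' % 2 →
    tailBuildCF k t = tailBuildCF k' t
  | [], _, _, _ => rfl
  | p :: rest, k, k', h => by
    rw [tailBuildCF, tailBuildCF, h, tailBuild_parity rest (k + 1) (k' + 1) (by omega)]

theorem rebuildCF_eq_tailBuild : ∀ (t : List (List Char)) (p : List Char), t.length % 2 = 0 →
    rebuildCF (p :: t) = p ++ tailBuildCF 1 t
  | [], p, _ => by rw [rebuildCF, tailBuildCF]; simp
  | [c], p, h => by simp at h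
  | c :: q :: rest, p, h => by
    rw [rebuildCF, rebuildCF_eq_tailBuild rest q (by simp only [List.length_cons] at h; omega)]
    rw [tailBuildCF, tailBuildCF, tailBuild_parity rest 3 1 (by omega)]
    simp [List.append_assoc]

-- ===== VERDICT (by name: the statement is the Claim_ definition above) =====
theorem normalize_code_fences_py_spec : Claim_equal_normalize_code_fences_py := by
  intro text _dom
  unfold Spec_normalize_code_fences_py normalize_code_fences_py normalize_code_fences_py_alt
  rw [splitOn_eq_SpCF text.toList]
  have hcnt := count_eq_SpCF text.toList
  by_cases hA : (SpCF text.toList).length < 3 ∨ ((SpCF text.toList).length % 2 == 0) = true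
  · have hA' : (SpCF text.toList).length < 3 ∨ (SpCF text.toList).length % 2 = 0 := by
      simpa using hA
    have hB : PySem.Chars.count text.toList fenceCF < 2 ∨
        PySem.Chars.count text.toList fenceCF % 2 ≠ 0 := by
      omega
    rw [if_pos hA, if_pos hB]
  · have hA' : ¬((SpCF text.toList).length < 3 ∨ (SpCF text.toList).length % 2 = 0) := by
      simpa using hA
    have hB : ¬(PySem.Chars.count text.toList fenceCF < 2 ∨
        PySem.Chars.count text.toList fenceCF % 2 ≠ 0) := by
      omega
    rw [if_neg hA, if_neg hB]
    have hodd : (SpCF text.toList).length % 2 = 1 := by omega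
    obtain ⟨p0, t, hpt⟩ : ∃ p0 t, SpCF text.toList = p0 :: t := by
      match hS : SpCF text.toList with
      | [] => exact absurd hS (SpCF_ne_nil text.toList)
      | p :: t => exact ⟨p, t, rfl⟩
    have ht : t.length % 2 = 0 := by
      rw [hpt, List.length_cons] at hodd
      omega
    rw [fixCF_eq_rebuild text.toList hodd]
    rw [hpt, PySem.List.pyGetD_zero_cons, PySem.List.slice_from_one, List.tail_cons]
    rw [show (1 : Int) = ((1 : Nat) : Int) from rfl]
    show String.ofList (PySem.Chars.join [] (loopCF (PySem.List.enumerate t ((1 : Nat) : Int)) [p0])) =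
      String.ofList (rebuildCF (p0 :: t))
    rw [loopCF_join t 1 [p0], rebuildCF_eq_tailBuild t p0 ht, joinNil [p0]]
    simp
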